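-- pv_equiv track=rewrite | github.com/edoriggio/algorithms-and-data-structures | exercises/maximal_step_k_length.py | maixmal_step_k_length
-- ===== SOURCE A (Python) =====
-- def maixmal_step_k_length(A, k):
--     increasing = True
--     curr_count = 1
--
--     max_count = 1
--
--     for i in range(len(A)-1):
--         if (A[i] + k == A[i + 1]):
--             if not increasing:
--                 if curr_count > max_count:
--                     max_count = curr_count
--
--                 increasing = True
--                 curr_count = 1
--
--             curr_count += 1
--         elif (A[i] - k == A[i + 1]):
--             if increasing:
--                 if curr_count > max_count:
--                     max_count = curr_count
--
--                 increasing = False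
--                 curr_count = 1
--
--             curr_count += 1
--         else:
--             if curr_count > max_count:
--                 max_count = curr_count
--
--             curr_count = 1
--
--     if curr_count > max_count:
--         max_count = curr_count
--
--     return max_count
-- ===== SOURCE B (Python) =====
-- def maixmal_step_k_length(A, k):
--     # Phase 1: classify each adjacent step as +k (1), -k (-1), or neither (0).
--     c = [1 if A[i] + k == A[i + 1] else (-1 if A[i] - k == A[i + 1] else 0)
--          for i in range(len(A) - 1)]
--     # Phase 2: scan maximal runs of equal classification; the longest nonzero
--     # run of m steps spans m + 1 elements.
--     best = 0
--     n = len(c)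
--     i = 0
--     while i < n:
--         j = i
--         while j < n and c[j] == c[i]:
--             j += 1
--         if c[i] != 0:
--             best = max(best, j - i)
--         i = j
--     return best + 1
-- ===== Notes on version B (the rewrite author's own statement) =====
-- stated objective: alternative
-- what changed: Replaces A's stateful scan (direction flag, current count, running max with flush logic in every branch) by two phases: classify each adjacent step as +k/-k/other, then take the longest run of equal nonzero classifications and add 1.
import Mathlib
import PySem

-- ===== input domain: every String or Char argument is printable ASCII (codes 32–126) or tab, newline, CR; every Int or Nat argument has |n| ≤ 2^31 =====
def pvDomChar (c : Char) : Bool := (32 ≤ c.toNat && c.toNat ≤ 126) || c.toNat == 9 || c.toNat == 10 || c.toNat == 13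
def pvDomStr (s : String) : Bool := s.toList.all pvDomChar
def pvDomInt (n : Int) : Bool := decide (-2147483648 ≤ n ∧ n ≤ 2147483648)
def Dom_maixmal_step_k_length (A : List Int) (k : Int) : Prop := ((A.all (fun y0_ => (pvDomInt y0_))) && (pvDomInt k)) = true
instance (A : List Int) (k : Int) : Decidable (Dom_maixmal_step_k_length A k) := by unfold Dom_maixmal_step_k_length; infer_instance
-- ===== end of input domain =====

-- B replaces A's stateful direction-flag scan by classify-steps-then-longest-run (alternative decomposition, same O(n) cost).

-- ===== PORT A =====
-- literal transliteration of A's loop: state (increasing, curr_count, max_count), indices 0 .. len-2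
def maixmal_step_k_length (A : List Int) (k : Int) : Int :=
  let st := (List.range (A.length - 1)).foldl (fun (st : Bool × Int × Int) i =>
    let increasing := st.1; let curr := st.2.1; let mx := st.2.2
    if A.getD i 0 + k = A.getD (i + 1) 0 then
      if ¬ increasing then (true, 1 + 1, if curr > mx then curr else mx)
      else (increasing, curr + 1, mx)
    else if A.getD i 0 - k = A.getD (i + 1) 0 then
      if increasing then (false, 1 + 1, if curr > mx then curr else mx)
      else (increasing, curr + 1, mx)
    else (increasing, 1, if curr > mx then curr else mx)) (true, 1, 1)
  if st.2.1 > st.2.2 then st.2.1 else st.2.2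

-- ===== PORT B =====
-- chunked scan of Source B's while loops: take the maximal run of the head classification, recurse on the rest
def bestRunB (c : List Int) : Int :=
  match c with
  | [] => 0
  | x :: t =>
    let m := (t.takeWhile (fun y => y == x)).length
    let rest := t.dropWhile (fun y => y == x)
    max (if x ≠ 0 then (m : Int) + 1 else 0) (bestRunB rest)
  termination_by c.length
  decreasing_by
    have := List.length_dropWhile_le (fun y => y == x) t
    simp only [List.length_cons]; omega

def maixmal_step_k_length_alt (A : List Int) (k : Int) : Int :=
  let c := (List.range (A.length - 1)).map (fun i =>
    if A.getD i 0 + k = A.getD (i + 1) 0 then (1 : Int)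
    else if A.getD i 0 - k = A.getD (i + 1) 0 then -1 else 0)
  bestRunB c + 1

-- ===== PRECONDITION & SPEC =====
def Spec_maixmal_step_k_length (A : List Int) (k : Int) (out : Int) : Prop := out = maixmal_step_k_length_alt A k
instance (A : List Int) (k : Int) (out : Int) : Decidable (Spec_maixmal_step_k_length A k out) := by unfold Spec_maixmal_step_k_length; infer_instance

-- ===== CLAIM (what is proved, stated in full; the proofs are below) =====
def Claim_equal_maixmal_step_k_length : Prop := ∀ (A : List Int) (k : Int), Dom_maixmal_step_k_length A k → Spec_maixmal_step_k_length A k (maixmal_step_k_length A k)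

-- ===== LEMMAS AND PROOFS =====

theorem bestRunB_nil : bestRunB [] = 0 := by unfold bestRunB; rfl

theorem bestRunB_cons (x : Int) (t : List Int) : bestRunB (x :: t) =
    max (if x ≠ 0 then ((t.takeWhile (fun y => y == x)).length : Int) + 1 else 0)
      (bestRunB (t.dropWhile (fun y => y == x))) := by
  rw [bestRunB]

theorem bestRunB_nonneg_aux : ∀ (n : Nat) (c : List Int), c.length ≤ n → 0 ≤ bestRunB c := by
  intro n
  induction n with
  | zero =>
    intro c hc
    have hc' : c = [] := by cases c <;> simp_all
    simp [hc', bestRunB_nil]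
  | succ n ih =>
    intro c hc
    cases c with
    | nil => simp [bestRunB_nil]
    | cons x t =>
      rw [bestRunB_cons]
      have h1 := List.length_dropWhile_le (fun y => y == x) t
      have h2 := ih (t.dropWhile (fun y => y == x)) (by simp at hc; omega)
      have h3 : (0:Int) ≤ (if x ≠ 0 then ((t.takeWhile (fun y => y == x)).length : Int) + 1 else 0) := by
        split_ifs <;> positivity
      omega

theorem bestRunB_nonneg (c : List Int) : 0 ≤ bestRunB c :=
  bestRunB_nonneg_aux c.length c le_rfl

-- direction value tracked by A's boolean flag
def dirv (inc : Bool) : Int := if inc then 1 else -1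

theorem dirv_true : dirv true = 1 := rfl
theorem dirv_false : dirv false = -1 := rfl

-- A's loop body, as a function of the step classification
def stepG (st : Bool × Int × Int) (x : Int) : Bool × Int × Int :=
  let increasing := st.1; let curr := st.2.1; let mx := st.2.2
  if x = 1 then
    if ¬ increasing then (true, 1 + 1, if curr > mx then curr else mx)
    else (increasing, curr + 1, mx)
  else if x = -1 then
    if increasing then (false, 1 + 1, if curr > mx then curr else mx)
    else (increasing, curr + 1, mx)
  else (increasing, 1, if curr > mx then curr else mx)

-- run-max semantics of A's scan, with the final flush folded in
def G (inc : Bool) (curr : Int) : List Int → Int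
  | [] => curr
  | x :: t =>
    if x = 1 then (if inc then G true (curr + 1) t else max curr (G true 2 t))
    else if x = -1 then (if inc then max curr (G false 2 t) else G false (curr + 1) t)
    else max curr (G inc 1 t)

theorem foldG_eq (c : List Int) : ∀ (inc : Bool) (curr mx : Int),
    (fun st : Bool × Int × Int => if st.2.1 > st.2.2 then st.2.1 else st.2.2)
      (c.foldl stepG (inc, curr, mx)) = max mx (G inc curr c) := by
  induction c with
  | nil => intro inc curr mx; simp [G]; omega
  | cons x t ih =>
    intro inc curr mx
    simp only [List.foldl_cons, stepG, G]
    by_cases h1 : x = 1 <;> by_cases h2 : x = -1 <;> cases inc <;>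
      simp [h1, h2, ih] <;> omega

theorem bestRunB_drop_zero (t : List Int) :
    bestRunB t = bestRunB (t.dropWhile (fun y => y == (0 : Int))) := by
  cases t with
  | nil => simp
  | cons y t' =>
    by_cases h : y = 0
    · subst h
      rw [bestRunB_cons, List.dropWhile_cons_of_pos (by simp)]
      have := bestRunB_nonneg (t'.dropWhile (fun y => y == (0 : Int)))
      simp
      omega
    · rw [List.dropWhile_cons_of_neg (by simp [h])]

theorem chunk_eq (c : List Int) (inc : Bool) :
    max (1 + ((c.takeWhile (fun y => y == dirv inc)).length : Int))
      (bestRunB (c.dropWhile (fun y => y == dirv inc)) + 1) = bestRunB c + 1 := by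
  cases c with
  | nil => simp [bestRunB_nil]
  | cons x t =>
    by_cases h : x = dirv inc
    · subst h
      rw [List.takeWhile_cons_of_pos (by simp), List.dropWhile_cons_of_pos (by simp),
        bestRunB_cons]
      have hx : dirv inc ≠ 0 := by cases inc <;> simp [dirv]
      rw [if_pos hx]
      simp only [List.length_cons]
      push_cast
      omega
    · rw [List.takeWhile_cons_of_neg (by simp [h]), List.dropWhile_cons_of_neg (by simp [h])]
      have := bestRunB_nonneg (x :: t)
      simp
      omega

theorem G_eq (c : List Int) (h : ∀ x ∈ c, x = 1 ∨ x = -1 ∨ x = 0) :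
    ∀ (inc : Bool) (curr : Int), 1 ≤ curr →
    G inc curr c = max (curr + ((c.takeWhile (fun y => y == dirv inc)).length : Int))
      (bestRunB (c.dropWhile (fun y => y == dirv inc)) + 1) := by
  induction c with
  | nil =>
    intro inc curr hc
    simp [G, bestRunB_nil]
    omega
  | cons x t ih =>
    intro inc curr hc
    have ht : ∀ y ∈ t, y = 1 ∨ y = -1 ∨ y = 0 := fun y hy => h y (by simp [hy])
    rcases h x (by simp) with h1 | h1 | h1 <;> subst h1 <;> cases inc
    -- x = 1, inc = false : direction change, flush
    · have hG : G false curr (1 :: t) = max curr (G true 2 t) := by simp [G]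
      rw [hG, ih ht true 2 (by omega)]
      simp only [dirv_true, dirv_false]
      rw [List.takeWhile_cons_of_neg (by simp), List.dropWhile_cons_of_neg (by simp),
        bestRunB_cons, if_pos (by norm_num)]
      simp only [List.length_nil]
      push_cast
      omega
    -- x = 1, inc = true : continue
    · have hG : G true curr (1 :: t) = G true (curr + 1) t := by simp [G]
      rw [hG, ih ht true (curr + 1) (by omega)]
      rw [List.takeWhile_cons_of_pos (by simp [dirv]), List.dropWhile_cons_of_pos (by simp [dirv])]
      simp only [List.length_cons]
      push_cast
      omega
    -- x = -1, inc = false : continue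
    · have hG : G false curr (-1 :: t) = G false (curr + 1) t := by simp [G]
      rw [hG, ih ht false (curr + 1) (by omega)]
      rw [List.takeWhile_cons_of_pos (by simp [dirv]), List.dropWhile_cons_of_pos (by simp [dirv])]
      simp only [List.length_cons]
      push_cast
      omega
    -- x = -1, inc = true : direction change, flush
    · have hG : G true curr (-1 :: t) = max curr (G false 2 t) := by simp [G]
      rw [hG, ih ht false 2 (by omega)]
      simp only [dirv_true, dirv_false]
      rw [List.takeWhile_cons_of_neg (by simp), List.dropWhile_cons_of_neg (by simp),
        bestRunB_cons, if_pos (by norm_num)]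
      simp only [List.length_nil]
      push_cast
      omega
    -- x = 0, inc = false : reset, run broken
    · have hG : G false curr (0 :: t) = max curr (G false 1 t) := by simp [G]
      rw [hG, ih ht false 1 (le_refl 1), chunk_eq t false]
      rw [List.takeWhile_cons_of_neg (by simp [dirv]), List.dropWhile_cons_of_neg (by simp [dirv]),
        bestRunB_cons, if_neg (by norm_num)]
      have hz := bestRunB_drop_zero t
      have := bestRunB_nonneg (t.dropWhile (fun y => y == (0 : Int)))
      simp only [List.length_nil]
      push_cast
      omega
    -- x = 0, inc = true : reset, run broken
    · have hG : G true curr (0 :: t) = max curr (G true 1 t) := by simp [G]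
      rw [hG, ih ht true 1 (le_refl 1), chunk_eq t true]
      rw [List.takeWhile_cons_of_neg (by simp [dirv]), List.dropWhile_cons_of_neg (by simp [dirv]),
        bestRunB_cons, if_neg (by norm_num)]
      have hz := bestRunB_drop_zero t
      have := bestRunB_nonneg (t.dropWhile (fun y => y == (0 : Int)))
      simp only [List.length_nil]
      push_cast
      omega

theorem body_eq (A : List Int) (k : Int) (st : Bool × Int × Int) (i : Nat) :
    (fun (st : Bool × Int × Int) i =>
      let increasing := st.1; let curr := st.2.1; let mx := st.2.2
      if A.getD i 0 + k = A.getD (i + 1) 0 then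
        if ¬ increasing then (true, 1 + 1, if curr > mx then curr else mx)
        else (increasing, curr + 1, mx)
      else if A.getD i 0 - k = A.getD (i + 1) 0 then
        if increasing then (false, 1 + 1, if curr > mx then curr else mx)
        else (increasing, curr + 1, mx)
      else (increasing, 1, if curr > mx then curr else mx)) st i
    = stepG st (if A.getD i 0 + k = A.getD (i + 1) 0 then (1 : Int)
        else if A.getD i 0 - k = A.getD (i + 1) 0 then -1 else 0) := by
  simp only [stepG]
  split_ifs <;> simp_all

-- ===== VERDICT (by name: the statement is the Claim_ definition above) =====
theorem maixmal_step_k_length_spec : Claim_equal_maixmal_step_k_length := by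
  intro A k _
  unfold Spec_maixmal_step_k_length maixmal_step_k_length maixmal_step_k_length_alt
  set f : Nat → Int := fun i =>
    if A.getD i 0 + k = A.getD (i + 1) 0 then (1 : Int)
    else if A.getD i 0 - k = A.getD (i + 1) 0 then -1 else 0 with hf
  set c : List Int := (List.range (A.length - 1)).map f with hcdef
  have hbody : (List.range (A.length - 1)).foldl (fun (st : Bool × Int × Int) i =>
      let increasing := st.1; let curr := st.2.1; let mx := st.2.2
      if A.getD i 0 + k = A.getD (i + 1) 0 then
        if ¬ increasing then (true, 1 + 1, if curr > mx then curr else mx)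
        else (increasing, curr + 1, mx)
      else if A.getD i 0 - k = A.getD (i + 1) 0 then
        if increasing then (false, 1 + 1, if curr > mx then curr else mx)
        else (increasing, curr + 1, mx)
      else (increasing, 1, if curr > mx then curr else mx)) (true, 1, 1)
      = c.foldl stepG (true, 1, 1) := by
    rw [hcdef, List.foldl_map]
    congr 1
    funext st i
    exact body_eq A k st i
  simp only [hbody]
  have hfold := foldG_eq c true 1 1
  simp only at hfold
  rw [hfold]
  have hmem : ∀ x ∈ c, x = 1 ∨ x = -1 ∨ x = 0 := by
    intro x hx
    rw [hcdef] at hx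
    simp only [List.mem_map] at hx
    obtain ⟨i, _, hxi⟩ := hx
    rw [hf] at hxi
    dsimp at hxi
    split_ifs at hxi <;> omega
  rw [G_eq c hmem true 1 (le_refl 1), chunk_eq c true]
  have := bestRunB_nonneg c
  omega
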